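-- pv_equiv track=rewrite | github.com/vpc20/advent-of-code-2023 | aoc_3_part1.py | find_numbers_in_grid
-- ===== SOURCE A (Python) =====
-- def find_numbers_in_grid(grid):
--     num_coords = []
--     for i, row in enumerate(grid):
--         digit_found = False
--         number_in_grid = ''
--         for j, char in enumerate(row):
--             if char.isdigit():
--                 if digit_found is False:
--                     start_coord = (i, j)
--                     digit_found = True
--                 number_in_grid += grid[i][j]
--             else:
--                 if digit_found is True:
--                     end_coord = (i, j)
--                     num_coords.append((start_coord, end_coord, int(number_in_grid)))
--                     digit_found = False
--                     number_in_grid = ''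
--         if digit_found is True:
--             end_coord = (i, len(row))
--             num_coords.append((start_coord, end_coord, int(number_in_grid)))
--     return num_coords
-- ===== SOURCE B (Python) =====
-- def find_numbers_in_grid(grid):
--     result = []
--     for i, row in enumerate(grid):
--         j = 0
--         n = len(row)
--         while j < n:
--             if row[j].isdigit():
--                 k = j
--                 while k < n and row[k].isdigit():
--                     k += 1
--                 result.append(((i, j), (i, k), int(row[j:k])))
--                 j = k
--             else:
--                 j += 1
--     return result
-- ===== Notes on version B (the rewrite author's own statement) =====
-- stated objective: simpler
-- what changed: Replaced A's per-character digit_found/number_in_grid state machine with two append sites by an index-jumping span scan: find each maximal digit run row[j:k] at once, emit ((i,j),(i,k),int(row[j:k])) in one place, and jump j to k.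
import Mathlib
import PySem

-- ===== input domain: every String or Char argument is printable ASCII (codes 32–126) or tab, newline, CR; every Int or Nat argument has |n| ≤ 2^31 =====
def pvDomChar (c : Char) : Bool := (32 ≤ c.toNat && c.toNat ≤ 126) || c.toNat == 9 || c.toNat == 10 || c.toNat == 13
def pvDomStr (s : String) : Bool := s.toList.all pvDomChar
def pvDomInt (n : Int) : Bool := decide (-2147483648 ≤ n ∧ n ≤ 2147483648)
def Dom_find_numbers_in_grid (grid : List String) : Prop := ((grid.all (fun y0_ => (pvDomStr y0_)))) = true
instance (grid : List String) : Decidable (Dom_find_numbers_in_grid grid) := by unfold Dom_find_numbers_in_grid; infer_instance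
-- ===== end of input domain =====

-- B replaces A's digit_found/number_in_grid state machine by an index-jumping maximal-run scan (simpler; same cost).

-- int(number_in_grid) / int(row[j:k]): in both ports the argument is a nonempty ASCII digit run,
-- where PySem.Int.ofChars? always returns some; the default is never used.
def pvIntOf (num : List Char) : Int := (PySem.Int.ofChars? num).getD 0

-- ===== PORT A =====
-- the inner 'for j, char in enumerate(row)' loop, threading (num_coords, digit_found, start_coord, number_in_grid)
def loopA (i : Int) (st : List ((Int × Int) × (Int × Int) × Int) × Bool × (Int × Int) × List Char) :
    List (Int × Char) → List ((Int × Int) × (Int × Int) × Int) × Bool × (Int × Int) × List Char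
  | [] => st
  | (j, c) :: rest =>
    match st with
    | (acc, found, start, num) =>
      if PySem.Chars.isdigit c then
        loopA i (acc, true, (if found then start else (i, j)), num ++ [c]) rest
      else if found then
        loopA i (acc ++ [(start, ((i, j) : Int × Int), pvIntOf num)], false, start, []) rest
      else
        loopA i (acc, found, start, num) rest

-- one iteration of the outer loop: run the inner loop, then the trailing 'if digit_found' append
def rowA (i : Int) (row : String) (acc : List ((Int × Int) × (Int × Int) × Int)) :
    List ((Int × Int) × (Int × Int) × Int) :=
  match loopA i (acc, false, (0, 0), []) (PySem.List.enumerate row.toList 0) with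
  | (acc', found, start, num) =>
    if found then acc' ++ [(start, ((i, (row.toList.length : Int)) : Int × Int), pvIntOf num)] else acc'

def find_numbers_in_grid (grid : List String) : List ((Int × Int) × (Int × Int) × Int) :=
  (PySem.List.enumerate grid 0).foldl (fun num_coords ir => rowA ir.1 ir.2 num_coords) []

-- ===== PORT B =====
-- the 'while j < n' scan: on a digit, take the maximal digit run row[j:k] (the inner while) and jump to k
def rowB (i : Int) (j : Int) : List Char → List ((Int × Int) × (Int × Int) × Int)
  | [] => []
  | c :: rest =>
    if PySem.Chars.isdigit c then
      let run := (c :: rest).takeWhile PySem.Chars.isdigit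
      ((i, j), ((i, j + (run.length : Int)) : Int × Int), pvIntOf run) ::
        rowB i (j + (run.length : Int)) ((c :: rest).dropWhile PySem.Chars.isdigit)
    else rowB i (j + 1) rest
  termination_by cs => cs.length
  decreasing_by
  · rename_i h
    simp only [List.dropWhile_cons, h, if_true, List.length_cons]
    exact Nat.lt_succ_of_le (List.length_dropWhile_le _ _)
  · simp

def find_numbers_in_grid_alt (grid : List String) : List ((Int × Int) × (Int × Int) × Int) :=
  (PySem.List.enumerate grid 0).flatMap (fun ir => rowB ir.1 0 ir.2.toList)

-- ===== PRECONDITION & SPEC =====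
def Spec_find_numbers_in_grid (grid : List String) (out : List ((Int × Int) × (Int × Int) × Int)) : Prop := out = find_numbers_in_grid_alt grid
instance (grid : List String) (out : List ((Int × Int) × (Int × Int) × Int)) : Decidable (Spec_find_numbers_in_grid grid out) := by unfold Spec_find_numbers_in_grid; infer_instance

-- ===== CLAIM (what is proved, stated in full; the proofs are below) =====
def Claim_equal_find_numbers_in_grid : Prop := ∀ (grid : List String), Dom_find_numbers_in_grid grid → Spec_find_numbers_in_grid grid (find_numbers_in_grid grid)

-- ===== LEMMAS AND PROOFS =====

-- A's end-of-row step, abstracted over the end column e (= j + remaining length)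
def finishA (i e : Int) (st : List ((Int × Int) × (Int × Int) × Int) × Bool × (Int × Int) × List Char) :
    List ((Int × Int) × (Int × Int) × Int) :=
  match st with
  | (acc, found, start, num) => if found then acc ++ [(start, ((i, e) : Int × Int), pvIntOf num)] else acc

lemma rowStep (i : Int) (cs : List Char) :
    (∀ (j : Int) (acc : List ((Int × Int) × (Int × Int) × Int)) (st0 : Int × Int),
      finishA i (j + cs.length) (loopA i (acc, false, st0, []) (PySem.List.enumerate cs j))
        = acc ++ rowB i j cs)
    ∧ (∀ (j : Int) (acc : List ((Int × Int) × (Int × Int) × Int)) (start : Int × Int) (num : List Char),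
      finishA i (j + cs.length) (loopA i (acc, true, start, num) (PySem.List.enumerate cs j))
        = acc ++ (start, ((i, j + ((cs.takeWhile PySem.Chars.isdigit).length : Int)) : Int × Int),
              pvIntOf (num ++ cs.takeWhile PySem.Chars.isdigit))
            :: rowB i (j + ((cs.takeWhile PySem.Chars.isdigit).length : Int)) (cs.dropWhile PySem.Chars.isdigit)) := by
  induction cs with
  | nil =>
    constructor
    · intro j acc st0
      simp [PySem.List.enumerate, loopA, finishA, rowB]
    · intro j acc start num
      simp [PySem.List.enumerate, loopA, finishA, rowB]
  | cons c rest ih =>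
    obtain ⟨ih0, ih1⟩ := ih
    constructor
    · intro j acc st0
      rw [PySem.List.enumerate_cons]
      by_cases hc : PySem.Chars.isdigit c = true
      · simp only [loopA, hc, if_true, if_false, Bool.false_eq_true]
        rw [show (j + ((c :: rest).length : Int)) = (j + 1) + (rest.length : Int) by push_cast [List.length_cons]; ring]
        rw [List.nil_append, ih1 (j + 1) acc (i, j) [c]]
        rw [rowB]
        simp only [hc, if_true, List.takeWhile_cons, List.dropWhile_cons,
          List.singleton_append, List.length_cons]
        push_cast
        ring_nf
      · simp only [loopA, hc, if_false, Bool.false_eq_true]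
        rw [show (j + ((c :: rest).length : Int)) = (j + 1) + (rest.length : Int) by push_cast [List.length_cons]; ring]
        rw [ih0 (j + 1) acc st0]
        rw [rowB]
        simp [hc]
    · intro j acc start num
      rw [PySem.List.enumerate_cons]
      by_cases hc : PySem.Chars.isdigit c = true
      · simp only [loopA, hc, if_true]
        rw [show (j + ((c :: rest).length : Int)) = (j + 1) + (rest.length : Int) by push_cast [List.length_cons]; ring]
        rw [ih1 (j + 1) acc start (num ++ [c])]
        simp only [List.takeWhile_cons, List.dropWhile_cons, hc, if_true, List.length_cons]
        simp only [List.append_assoc, List.singleton_append]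
        push_cast
        ring_nf
      · simp only [loopA, hc, if_true, if_false, Bool.false_eq_true]
        rw [show (j + ((c :: rest).length : Int)) = (j + 1) + (rest.length : Int) by push_cast [List.length_cons]; ring]
        rw [ih0 (j + 1) (acc ++ [(start, ((i, j) : Int × Int), pvIntOf num)]) start]
        have hr : rowB i j (c :: rest) = rowB i (j + 1) rest := by
          rw [rowB.eq_def]; simp [hc]
        simp [hc, hr]

lemma rowA_eq (i : Int) (row : String) (acc : List ((Int × Int) × (Int × Int) × Int)) :
    rowA i row acc = acc ++ rowB i 0 row.toList := by
  have h := (rowStep i row.toList).1 0 acc (0, 0)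
  simp only [zero_add] at h
  unfold rowA
  rw [← h]
  unfold finishA
  rcases loopA i (acc, false, (0, 0), []) (PySem.List.enumerate row.toList 0) with ⟨a, f, s, n⟩
  rfl

lemma fold_eq (l : List (Int × String)) (acc : List ((Int × Int) × (Int × Int) × Int)) :
    l.foldl (fun a ir => rowA ir.1 ir.2 a) acc = acc ++ l.flatMap (fun ir => rowB ir.1 0 ir.2.toList) := by
  induction l generalizing acc with
  | nil => simp
  | cons p t ih =>
    simp only [List.foldl_cons]
    rw [rowA_eq, ih, List.flatMap_cons, List.append_assoc]

-- ===== VERDICT (by name: the statement is the Claim_ definition above) =====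
theorem find_numbers_in_grid_spec : Claim_equal_find_numbers_in_grid := by
  intro grid _
  unfold Spec_find_numbers_in_grid find_numbers_in_grid find_numbers_in_grid_alt
  rw [fold_eq]
  simp
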